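-- pv_equiv track=rewrite | github.com/benweissbehavehealth/national-recovery-directory | 02_scripts/analysis/network_clustering_framework.py | _has_compatible_certifications
-- ===== SOURCE A (Python) =====
-- def _has_compatible_certifications(org1, org2):
--     """Check if organizations have compatible certifications"""
--     # NARR certified might refer to other NARR certified
--     # Non-NARR might have their own networks
--
--     certs1 = org1.get('certifications', [])
--     certs2 = org2.get('certifications', [])
--
--     # Convert to lowercase for comparison
--     certs1_lower = [cert.lower() for cert in certs1]
--     certs2_lower = [cert.lower() for cert in certs2]
--
--     # Check for NARR certification compatibility
--     narr_keywords = ['narr', 'national alliance', 'recovery residence']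
--     has_narr1 = any(any(keyword in cert for keyword in narr_keywords) for cert in certs1_lower)
--     has_narr2 = any(any(keyword in cert for keyword in narr_keywords) for cert in certs2_lower)
--
--     if has_narr1 and has_narr2:
--         return True
--
--     # Check for state-specific certification networks
--     state_certs = ['farr', 'garr', 'marr', 'carr', 'parr']  # State recovery residence associations
--     for cert in state_certs:
--         if any(cert in c for c in certs1_lower) and any(cert in c for c in certs2_lower):
--             return True
--
--     # Check for treatment center accreditations
--     treatment_accreditations = ['carf', 'joint commission', 'coa', 'ncqa']
--     for accred in treatment_accreditations:
--         if any(accred in c for c in certs1_lower) and any(accred in c for c in certs2_lower):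
--             return True
--
--     return False
-- ===== SOURCE B (Python) =====
-- _NARR_KEYWORDS = ('narr', 'national alliance', 'recovery residence')
-- # the five state-association codes followed by the four accreditations
-- _CATEGORY_CODES = ('farr', 'garr', 'marr', 'carr', 'parr',
--                    'carf', 'joint commission', 'coa', 'ncqa')
--
--
-- def _category_tags(certs_lower):
--     """Set of certification-category tags appearing in the lowercased certs."""
--     tags = set()
--     if any(k in c for c in certs_lower for k in _NARR_KEYWORDS):
--         tags.add('narr')
--     for code in _CATEGORY_CODES:
--         if any(code in c for c in certs_lower):
--             tags.add(code)
--     return tags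
--
--
-- def _has_compatible_certifications(org1, org2):
--     certs1_lower = [cert.lower() for cert in org1.get('certifications', [])]
--     certs2_lower = [cert.lower() for cert in org2.get('certifications', [])]
--     return not _category_tags(certs1_lower).isdisjoint(_category_tags(certs2_lower))
-- ===== Notes on version B (the rewrite author's own statement) =====
-- stated objective: simpler
-- what changed: Instead of checking each category against both orgs' cert lists in interleaved any/any passes, B computes one set of category tags per org in a single helper and returns whether the two tag sets intersect.
import Mathlib
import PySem

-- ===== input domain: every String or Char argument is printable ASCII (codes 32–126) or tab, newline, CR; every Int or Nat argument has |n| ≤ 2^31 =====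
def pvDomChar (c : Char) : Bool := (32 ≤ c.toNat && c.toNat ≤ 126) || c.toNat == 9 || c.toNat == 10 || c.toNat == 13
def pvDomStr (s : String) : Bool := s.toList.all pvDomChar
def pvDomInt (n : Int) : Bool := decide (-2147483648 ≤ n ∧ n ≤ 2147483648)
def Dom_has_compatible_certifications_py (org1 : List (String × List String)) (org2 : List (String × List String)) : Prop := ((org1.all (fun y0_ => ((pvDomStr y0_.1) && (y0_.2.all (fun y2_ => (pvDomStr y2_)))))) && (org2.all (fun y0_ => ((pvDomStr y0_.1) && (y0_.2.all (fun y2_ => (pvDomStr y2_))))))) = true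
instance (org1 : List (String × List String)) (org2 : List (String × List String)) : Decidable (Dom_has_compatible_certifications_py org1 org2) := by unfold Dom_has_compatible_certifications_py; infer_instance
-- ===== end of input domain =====

-- B replaces A's interleaved per-category any/any checks by one tag-set per org and a set-disjointness test (objective: simpler).


-- ===== PORT A =====
def has_compatible_certifications_py (org1 : List (String × List String)) (org2 : List (String × List String)) : Bool :=
  let certs1 := (PySem.Dict.mk org1).getD "certifications" []
  let certs2 := (PySem.Dict.mk org2).getD "certifications" []
  let certs1_lower := certs1.map (fun cert => PySem.Str.lower cert)
  let certs2_lower := certs2.map (fun cert => PySem.Str.lower cert)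
  let narr_keywords := ["narr", "national alliance", "recovery residence"]
  let has_narr1 := certs1_lower.any (fun cert => narr_keywords.any (fun keyword => PySem.Str.isIn keyword cert))
  let has_narr2 := certs2_lower.any (fun cert => narr_keywords.any (fun keyword => PySem.Str.isIn keyword cert))
  if has_narr1 && has_narr2 then true
  else
    let state_certs := ["farr", "garr", "marr", "carr", "parr"]
    if state_certs.any (fun cert => (certs1_lower.any (fun c => PySem.Str.isIn cert c)) && (certs2_lower.any (fun c => PySem.Str.isIn cert c))) then
      true
    else
      let treatment_accreditations := ["carf", "joint commission", "coa", "ncqa"]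
      if treatment_accreditations.any (fun accred => (certs1_lower.any (fun c => PySem.Str.isIn accred c)) && (certs2_lower.any (fun c => PySem.Str.isIn accred c))) then
        true
      else
        false

-- ===== PORT B =====
def pvNarrKeywords : List String := ["narr", "national alliance", "recovery residence"]
-- the five state-association codes followed by the four accreditations
def pvCategoryCodes : List String := ["farr", "garr", "marr", "carr", "parr", "carf", "joint commission", "coa", "ncqa"]

def pvCategoryTags (certsLower : List String) : PySem.Set String :=
  let tags0 : PySem.Set String := PySem.Set.empty
  let tags1 := if certsLower.any (fun c => pvNarrKeywords.any (fun k => PySem.Str.isIn k c)) then PySem.Set.add tags0 "narr" else tags0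
  pvCategoryCodes.foldl (fun tags code => if certsLower.any (fun c => PySem.Str.isIn code c) then PySem.Set.add tags code else tags) tags1

def has_compatible_certifications_py_alt (org1 : List (String × List String)) (org2 : List (String × List String)) : Bool :=
  let certs1_lower := ((PySem.Dict.mk org1).getD "certifications" []).map (fun cert => PySem.Str.lower cert)
  let certs2_lower := ((PySem.Dict.mk org2).getD "certifications" []).map (fun cert => PySem.Str.lower cert)
  !(PySem.Set.isdisjoint (pvCategoryTags certs1_lower) (pvCategoryTags certs2_lower))

-- ===== PRECONDITION & SPEC =====
def Spec_has_compatible_certifications_py (org1 : List (String × List String)) (org2 : List (String × List String)) (out : Bool) : Prop := out = has_compatible_certifications_py_alt org1 org2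
instance (org1 : List (String × List String)) (org2 : List (String × List String)) (out : Bool) : Decidable (Spec_has_compatible_certifications_py org1 org2 out) := by unfold Spec_has_compatible_certifications_py; infer_instance

-- ===== CLAIM (what is proved, stated in full; the proofs are below) =====
def Claim_equal_has_compatible_certifications_py : Prop := ∀ (org1 : List (String × List String)) (org2 : List (String × List String)), Dom_has_compatible_certifications_py org1 org2 → Spec_has_compatible_certifications_py org1 org2 (has_compatible_certifications_py org1 org2)

-- ===== LEMMAS AND PROOFS =====

abbrev pvHasNarr (l : List String) : Bool := l.any (fun c => pvNarrKeywords.any (fun k => PySem.Str.isIn k c))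
abbrev pvHasCode (code : String) (l : List String) : Bool := l.any (fun c => PySem.Str.isIn code c)

lemma pvMem_foldl (cs : List String) (s : PySem.Set String) (l : List String) (t : String) :
    t ∈ cs.foldl (fun tags code => if l.any (fun c => PySem.Str.isIn code c) then PySem.Set.add tags code else tags) s
      ↔ t ∈ s ∨ (t ∈ cs ∧ pvHasCode t l = true) := by
  induction cs generalizing s with
  | nil => simp
  | cons c rest ih =>
    rw [List.foldl_cons]
    by_cases h : (l.any fun x => PySem.Str.isIn c x) = true
    · rw [if_pos h, ih, PySem.Set.mem_add]
      constructor
      · rintro ((h1 | rfl) | ⟨h1, h2⟩)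
        · exact Or.inl h1
        · exact Or.inr ⟨List.mem_cons_self, h⟩
        · exact Or.inr ⟨List.mem_cons_of_mem _ h1, h2⟩
      · rintro (h1 | ⟨h1, h2⟩)
        · exact Or.inl (Or.inl h1)
        · rcases List.mem_cons.mp h1 with rfl | h1
          · exact Or.inl (Or.inr rfl)
          · exact Or.inr ⟨h1, h2⟩
    · rw [if_neg h, ih]
      constructor
      · rintro (h1 | ⟨h1, h2⟩)
        · exact Or.inl h1
        · exact Or.inr ⟨List.mem_cons_of_mem _ h1, h2⟩
      · rintro (h1 | ⟨h1, h2⟩)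
        · exact Or.inl h1
        · rcases List.mem_cons.mp h1 with rfl | h1
          · exact absurd h2 h
          · exact Or.inr ⟨h1, h2⟩

lemma pvMem_tags (l : List String) (t : String) :
    t ∈ pvCategoryTags l ↔ (t = "narr" ∧ pvHasNarr l = true) ∨ (t ∈ pvCategoryCodes ∧ pvHasCode t l = true) := by
  unfold pvCategoryTags
  rw [pvMem_foldl]
  by_cases h : pvHasNarr l = true
  · rw [if_pos h, PySem.Set.mem_add]
    simp [PySem.Set.empty, h]
  · rw [if_neg h]
    simp [PySem.Set.empty, h]

lemma pvIfChain (a b c : Bool) :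
    (if a then true else if b then true else if c then true else false) = (a || b || c) := by
  cases a <;> cases b <;> cases c <;> rfl

lemma pvKey (l1 l2 : List String) :
    (if pvHasNarr l1 && pvHasNarr l2 then true
     else if (["farr", "garr", "marr", "carr", "parr"] : List String).any
            (fun cert => pvHasCode cert l1 && pvHasCode cert l2) then true
     else if (["carf", "joint commission", "coa", "ncqa"] : List String).any
            (fun accred => pvHasCode accred l1 && pvHasCode accred l2) then true
     else false)
      = !(PySem.Set.isdisjoint (pvCategoryTags l1) (pvCategoryTags l2)) := by
  rw [pvIfChain, Bool.eq_iff_iff]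
  have hsplit : pvCategoryCodes = ["farr", "garr", "marr", "carr", "parr"] ++ ["carf", "joint commission", "coa", "ncqa"] := rfl
  have hnarr : "narr" ∉ pvCategoryCodes := by decide
  constructor
  · intro h
    rw [Bool.not_eq_true']
    apply Bool.eq_false_iff.mpr
    intro hdisj
    have hd := (PySem.Set.isdisjoint_iff _ _).mp hdisj
    simp only [Bool.or_eq_true, Bool.and_eq_true] at h
    rcases h with (⟨h1, h2⟩ | hS) | hT
    · exact hd "narr" ((pvMem_tags l1 "narr").mpr (Or.inl ⟨rfl, h1⟩))
        ((pvMem_tags l2 "narr").mpr (Or.inl ⟨rfl, h2⟩))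
    · obtain ⟨c, hc, h12⟩ := List.any_eq_true.mp hS
      rw [Bool.and_eq_true] at h12
      have hcc : c ∈ pvCategoryCodes := by rw [hsplit]; exact List.mem_append_left _ hc
      exact hd c ((pvMem_tags l1 c).mpr (Or.inr ⟨hcc, h12.1⟩)) ((pvMem_tags l2 c).mpr (Or.inr ⟨hcc, h12.2⟩))
    · obtain ⟨c, hc, h12⟩ := List.any_eq_true.mp hT
      rw [Bool.and_eq_true] at h12
      have hcc : c ∈ pvCategoryCodes := by rw [hsplit]; exact List.mem_append_right _ hc
      exact hd c ((pvMem_tags l1 c).mpr (Or.inr ⟨hcc, h12.1⟩)) ((pvMem_tags l2 c).mpr (Or.inr ⟨hcc, h12.2⟩))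
  · intro h
    rw [Bool.not_eq_true'] at h
    have hne : ¬ ∀ x ∈ pvCategoryTags l1, x ∉ pvCategoryTags l2 := by
      intro hall
      rw [(PySem.Set.isdisjoint_iff _ _).mpr hall] at h
      cases h
    push_neg at hne
    obtain ⟨x, hx1, hx2⟩ := hne
    simp only [Bool.or_eq_true, Bool.and_eq_true]
    rcases (pvMem_tags l1 x).mp hx1 with ⟨hxe, hn1⟩ | ⟨hc1, hcode1⟩
    · rcases (pvMem_tags l2 x).mp hx2 with ⟨_, hn2⟩ | ⟨hc2, _⟩
      · exact Or.inl (Or.inl ⟨hn1, hn2⟩)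
      · exact absurd (hxe ▸ hc2) hnarr
    · rcases (pvMem_tags l2 x).mp hx2 with ⟨hxe, _⟩ | ⟨_, hcode2⟩
      · exact absurd (hxe ▸ hc1) hnarr
      · rw [hsplit] at hc1
        rcases List.mem_append.mp hc1 with hm | hm
        · exact Or.inl (Or.inr (List.any_eq_true.mpr ⟨x, hm, by rw [Bool.and_eq_true]; exact ⟨hcode1, hcode2⟩⟩))
        · exact Or.inr (List.any_eq_true.mpr ⟨x, hm, by rw [Bool.and_eq_true]; exact ⟨hcode1, hcode2⟩⟩)

-- ===== VERDICT (by name: the statement is the Claim_ definition above) =====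
theorem has_compatible_certifications_py_spec : Claim_equal_has_compatible_certifications_py := by
  intro org1 org2 _
  unfold Spec_has_compatible_certifications_py has_compatible_certifications_py has_compatible_certifications_py_alt
  exact pvKey _ _
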